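-- pv_equiv track=rewrite | github.com/vbanurag/playground_run | wayfair/ques.py | find_coupon
-- ===== SOURCE A (Python) =====
-- coupons = [
--     {"CategoryName":"Comforter Sets", "CouponName":"Comforters Sale"},
--     {"CategoryName":"Bedding", "CouponName":"Savings on Bedding"},
--     {"CategoryName":"Bed & Bath", "CouponName": "Low price for Bed & Bath"}
-- ]
--
-- categories = [
--     {"CategoryName":"Comforter Sets", "CategoryParentName":"Bedding"},
--     {"CategoryName":"Bedding", "CategoryParentName": "Bed & Bath"},
--     {"CategoryName":"Bed & Bath", "CategoryParentName": None},
--     {"CategoryName":"Soap Dispensers", "CategoryParentName":"Bathroom Accessories"},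
--     {"CategoryName":"Bathroom Accessories", "CategoryParentName":"Bed & Bath"},
--     {"CategoryName":"Toy Organizers", "CategoryParentName":"Baby And Kids"},
--     {"CategoryName":"Baby And Kids", "CategoryParentName": None}
-- ]
--
-- def find_coupon(category_name):
--     # Build a dictionary for quick lookup of category's parent
--     category_to_parent = {category["CategoryName"]: category["CategoryParentName"] for category in categories}
--
--     # Build a dictionary for quick lookup of coupon by category
--     category_to_coupon = {coupon["CategoryName"]: coupon["CouponName"] for coupon in coupons}
--
--     current_category = category_name
--
--     # Traverse up the hierarchy looking for a matching coupon
--     while current_category is not None: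
--         if current_category in category_to_coupon:
--             return category_to_coupon[current_category]
--         else:
--             current_category = category_to_parent.get(current_category, None)
--
--     # If no coupon is found throughout the hierarchy
--     return None
-- ===== SOURCE B (Python) =====
-- coupons = [
--     {"CategoryName":"Comforter Sets", "CouponName":"Comforters Sale"},
--     {"CategoryName":"Bedding", "CouponName":"Savings on Bedding"},
--     {"CategoryName":"Bed & Bath", "CouponName": "Low price for Bed & Bath"}
-- ]
--
-- categories = [
--     {"CategoryName":"Comforter Sets", "CategoryParentName":"Bedding"},
--     {"CategoryName":"Bedding", "CategoryParentName": "Bed & Bath"},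
--     {"CategoryName":"Bed & Bath", "CategoryParentName": None},
--     {"CategoryName":"Soap Dispensers", "CategoryParentName":"Bathroom Accessories"},
--     {"CategoryName":"Bathroom Accessories", "CategoryParentName":"Bed & Bath"},
--     {"CategoryName":"Toy Organizers", "CategoryParentName":"Baby And Kids"},
--     {"CategoryName":"Baby And Kids", "CategoryParentName": None}
-- ]
--
-- def find_coupon(category_name):
--     category_to_parent = dict((c["CategoryName"], c["CategoryParentName"]) for c in categories)
--     category_to_coupon = dict((c["CategoryName"], c["CouponName"]) for c in coupons)
--
--     def resolve(current):
--         coupon = category_to_coupon.get(current)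
--         if coupon is not None:
--             return coupon
--         parent = category_to_parent.get(current)
--         return resolve(parent) if parent is not None else None
--
--     return resolve(category_name)
-- ===== Notes on version B (the rewrite author's own statement) =====
-- stated objective: alternative
-- what changed: The iterative while-loop that walks the category parent chain is replaced by a recursive resolve helper (and the dict comprehensions by dict() over pair generators); same dictionaries, same lookups, same results.
import Mathlib
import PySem

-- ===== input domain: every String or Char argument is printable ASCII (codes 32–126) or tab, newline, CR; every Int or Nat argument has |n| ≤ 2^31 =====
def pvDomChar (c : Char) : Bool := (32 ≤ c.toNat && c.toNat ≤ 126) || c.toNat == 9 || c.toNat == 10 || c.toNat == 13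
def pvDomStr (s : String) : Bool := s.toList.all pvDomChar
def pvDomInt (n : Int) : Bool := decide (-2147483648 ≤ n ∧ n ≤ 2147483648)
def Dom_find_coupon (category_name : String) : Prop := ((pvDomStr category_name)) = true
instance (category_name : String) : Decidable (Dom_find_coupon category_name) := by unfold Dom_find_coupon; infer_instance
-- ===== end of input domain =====

-- B replaces A's while-loop walk up the parent chain by a recursive resolve helper (iterative → recursive decomposition); same dictionaries, same results.

-- module-level data (shared by both Pythons): categories as (name, parent) pairs, coupons as (name, coupon) pairs
def pvCoupons : List (String × String) :=
  [("Comforter Sets", "Comforters Sale"),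
   ("Bedding", "Savings on Bedding"),
   ("Bed & Bath", "Low price for Bed & Bath")]

def pvCategories : List (String × Option String) :=
  [("Comforter Sets", some "Bedding"),
   ("Bedding", some "Bed & Bath"),
   ("Bed & Bath", none),
   ("Soap Dispensers", some "Bathroom Accessories"),
   ("Bathroom Accessories", some "Bed & Bath"),
   ("Toy Organizers", some "Baby And Kids"),
   ("Baby And Kids", none)]

-- ===== PORT A =====
-- A's dict comprehensions: fold inserting each pair
def pvCatToParentA : PySem.Dict String (Option String) :=
  pvCategories.foldl (fun d p => d.insert p.1 p.2) PySem.Dict.empty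

def pvCatToCouponA : PySem.Dict String String :=
  pvCoupons.foldl (fun d p => d.insert p.1 p.2) PySem.Dict.empty

-- A's while-loop over current_category : Option String ('while current is not None').
-- The fuel is only a totality guard: every parent chain in the fixed data has length < 8, so fuel is never exhausted.
def pvLoopA : Nat → Option String → Option String
  | 0, _ => none
  | _ + 1, none => none
  | fuel + 1, some cur =>
    match pvCatToCouponA.get? cur with
    | some c => some c
    | none => pvLoopA fuel (pvCatToParentA.getD cur none)

def find_coupon (category_name : String) : Option String :=
  pvLoopA 8 (some category_name)

-- ===== PORT B =====
-- B's dict(...) constructors over the pair generators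
def pvCatToParentB : PySem.Dict String (Option String) := PySem.Dict.ofList pvCategories
def pvCatToCouponB : PySem.Dict String String := PySem.Dict.ofList pvCoupons

-- B's recursive resolve over the current category name; fuel is the same totality guard, never exhausted.
def pvResolveB : Nat → String → Option String
  | 0, _ => none
  | fuel + 1, cur =>
    match pvCatToCouponB.get? cur with
    | some coupon => some coupon
    | none =>
      match pvCatToParentB.getD cur none with
      | some parent => pvResolveB fuel parent
      | none => none

def find_coupon_alt (category_name : String) : Option String :=
  pvResolveB 8 category_name

-- ===== PRECONDITION & SPEC =====
def Spec_find_coupon (category_name : String) (out : Option String) : Prop := out = find_coupon_alt category_name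
instance (category_name : String) (out : Option String) : Decidable (Spec_find_coupon category_name out) := by unfold Spec_find_coupon; infer_instance

-- ===== CLAIM (what is proved, stated in full; the proofs are below) =====
def Claim_equal_find_coupon : Prop := ∀ (category_name : String), Dom_find_coupon category_name → Spec_find_coupon category_name (find_coupon category_name)

-- ===== LEMMAS AND PROOFS =====

-- On any name outside the fixed category table both programs return none at once.
theorem pv_unknown (s : String)
    (h1 : s ≠ "Comforter Sets") (h2 : s ≠ "Bedding") (h3 : s ≠ "Bed & Bath")
    (h4 : s ≠ "Soap Dispensers") (h5 : s ≠ "Bathroom Accessories")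
    (h6 : s ≠ "Toy Organizers") (h7 : s ≠ "Baby And Kids") :
    find_coupon s = find_coupon_alt s := by
  have e1 : ("Comforter Sets" == s) = false := beq_eq_false_iff_ne.2 (Ne.symm h1)
  have e2 : ("Bedding" == s) = false := beq_eq_false_iff_ne.2 (Ne.symm h2)
  have e3 : ("Bed & Bath" == s) = false := beq_eq_false_iff_ne.2 (Ne.symm h3)
  have e4 : ("Soap Dispensers" == s) = false := beq_eq_false_iff_ne.2 (Ne.symm h4)
  have e5 : ("Bathroom Accessories" == s) = false := beq_eq_false_iff_ne.2 (Ne.symm h5)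
  have e6 : ("Toy Organizers" == s) = false := beq_eq_false_iff_ne.2 (Ne.symm h6)
  have e7 : ("Baby And Kids" == s) = false := beq_eq_false_iff_ne.2 (Ne.symm h7)
  simp [find_coupon, find_coupon_alt, pvLoopA, pvResolveB,
        pvCatToCouponA, pvCatToCouponB, pvCatToParentA, pvCatToParentB,
        pvCoupons, pvCategories, PySem.Dict.ofList, PySem.Dict.get?, PySem.Dict.getD,
        PySem.Dict.insert, PySem.Dict.empty, PySem.Dict.update, List.foldl, List.find?,
        e1, e2, e3, e4, e5, e6, e7]

-- ===== VERDICT (by name: the statement is the Claim_ definition above) =====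
theorem find_coupon_spec : Claim_equal_find_coupon := by
  intro s _
  unfold Spec_find_coupon
  by_cases h1 : s = "Comforter Sets"; · subst h1; decide
  by_cases h2 : s = "Bedding"; · subst h2; decide
  by_cases h3 : s = "Bed & Bath"; · subst h3; decide
  by_cases h4 : s = "Soap Dispensers"; · subst h4; decide
  by_cases h5 : s = "Bathroom Accessories"; · subst h5; decide
  by_cases h6 : s = "Toy Organizers"; · subst h6; decide
  by_cases h7 : s = "Baby And Kids"; · subst h7; decide
  exact pv_unknown s h1 h2 h3 h4 h5 h6 h7
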